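-- pv_equiv track=rewrite | github.com/slimbootloader/slimbootloader | Platform/CommonBoardPkg/Tools/GpioDataConvert.py | get_field_len_offset
-- ===== SOURCE A (Python) =====
-- def get_field_len_offset (efield, efields):
--     f_len = 0
--     f_offset = 0
--
--     for field in efields:
--         if field[0] == efield:
--             f_len = field[2]
--             break
--         else:
--             f_offset += field[2]
--
--     return f_len, f_offset
-- ===== SOURCE B (Python) =====
-- def get_field_len_offset(efield, efields):
--     # Locate the field's position first, then sum the preceding lengths in a
--     # separate pass (locate-then-sum decomposition instead of accumulate-until-break).
--     names = [f[0] for f in efields]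
--     if efield in names:
--         i = names.index(efield)
--         return efields[i][2], sum(f[2] for f in efields[:i])
--     return 0, sum(f[2] for f in efields)
-- ===== Notes on version B (the rewrite author's own statement) =====
-- stated objective: alternative
-- what changed: Replaces the single accumulate-until-break loop by a locate-then-sum decomposition: build the name list, find the field's index with list.index, and compute the offset as a separate sum over the prefix (or the whole list when absent).
import Mathlib
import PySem

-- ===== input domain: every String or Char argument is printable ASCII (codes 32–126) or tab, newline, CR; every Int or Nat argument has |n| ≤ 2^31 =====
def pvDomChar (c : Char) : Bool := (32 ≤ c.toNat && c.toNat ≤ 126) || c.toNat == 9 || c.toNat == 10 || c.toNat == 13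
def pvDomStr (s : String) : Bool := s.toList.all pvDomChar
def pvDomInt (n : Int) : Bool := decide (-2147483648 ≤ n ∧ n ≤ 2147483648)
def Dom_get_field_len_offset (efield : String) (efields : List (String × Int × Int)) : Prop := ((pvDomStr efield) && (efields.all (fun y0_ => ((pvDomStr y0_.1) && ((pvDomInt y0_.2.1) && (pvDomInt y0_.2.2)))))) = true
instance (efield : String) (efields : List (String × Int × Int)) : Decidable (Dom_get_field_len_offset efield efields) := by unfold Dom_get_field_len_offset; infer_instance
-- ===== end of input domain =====

-- B replaces A's accumulate-until-break loop by a locate-then-sum decomposition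
-- (find the field's index, then sum the prefix of lengths in a separate pass).

-- ===== PORT A =====
-- the for-loop of A: off is the running f_offset; break returns immediately
def gfloLoopA (efield : String) : List (String × Int × Int) → Int → Int × Int
  | [], off => (0, off)
  | f :: rest, off =>
      if f.1 == efield then (f.2.2, off)
      else gfloLoopA efield rest (off + f.2.2)

def get_field_len_offset (efield : String) (efields : List (String × Int × Int)) : Int × Int :=
  gfloLoopA efield efields 0

-- ===== PORT B =====
def get_field_len_offset_alt (efield : String) (efields : List (String × Int × Int)) : Int × Int :=
  let names := efields.map (fun f => f.1)
  match PySem.List.index? names efield with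
  | some i =>
      match PySem.List.pyGet? efields (i : Int) with
      | some f => (f.2.2, ((PySem.List.slice efields none (some (i : Int))).map (fun f => f.2.2)).sum)
      | none => (0, 0)   -- unreachable: index? guarantees i < length
  | none => (0, (efields.map (fun f => f.2.2)).sum)

-- ===== PRECONDITION & SPEC =====
def Spec_get_field_len_offset (efield : String) (efields : List (String × Int × Int)) (out : Int × Int) : Prop := out = get_field_len_offset_alt efield efields
instance (efield : String) (efields : List (String × Int × Int)) (out : Int × Int) : Decidable (Spec_get_field_len_offset efield efields out) := by unfold Spec_get_field_len_offset; infer_instance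

-- ===== CLAIM (what is proved, stated in full; the proofs are below) =====
def Claim_equal_get_field_len_offset : Prop := ∀ (efield : String) (efields : List (String × Int × Int)), Dom_get_field_len_offset efield efields → Spec_get_field_len_offset efield efields (get_field_len_offset efield efields)

-- ===== LEMMAS AND PROOFS =====

-- ===== VERDICT (by name: the statement is the Claim_ definition above) =====
lemma alt_unfold (efield : String) (efields : List (String × Int × Int)) :
    get_field_len_offset_alt efield efields =
      (match PySem.List.index? (efields.map (fun g => g.1)) efield with
       | some i =>
          match PySem.List.pyGet? efields (i : Int) with
          | some g => (g.2.2, ((PySem.List.slice efields none (some (i : Int))).map (fun g => g.2.2)).sum)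
          | none => (0, 0)
       | none => (0, (efields.map (fun g => g.2.2)).sum)) := rfl

lemma alt_cons_self (f : String × Int × Int) (rest : List (String × Int × Int)) :
    get_field_len_offset_alt f.1 (f :: rest) = (f.2.2, 0) := by
  rw [alt_unfold, List.map_cons, PySem.List.index?_cons_self]
  simp [PySem.List.pyGet?, PySem.List.pyIdx?, PySem.List.slice, PySem.List.clampIdx]

lemma alt_cons_ne (efield : String) (f : String × Int × Int)
    (rest : List (String × Int × Int)) (h : f.1 ≠ efield) :
    get_field_len_offset_alt efield (f :: rest) =
      ((get_field_len_offset_alt efield rest).1,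
       f.2.2 + (get_field_len_offset_alt efield rest).2) := by
  rw [alt_unfold, alt_unfold, List.map_cons, PySem.List.index?_cons_of_ne _ h]
  cases hidx : PySem.List.index? (rest.map (fun g => g.1)) efield with
  | none => simp
  | some j =>
    obtain ⟨hk, -, -⟩ := PySem.List.getElem_of_index?_eq_some hidx
    rw [List.length_map] at hk
    have hcast : ((j + 1 : Nat) : Int) = ((j : Nat) : Int) + 1 := by push_cast; ring
    simp only [Option.map_some, hcast]
    rw [show ((j : Nat) : Int) + 1 = ((j + 1 : Nat) : Int) from by push_cast; ring]
    rw [PySem.List.pyGet?_natCast, PySem.List.pyGet?_natCast,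
      PySem.List.slice_to_natCast, PySem.List.slice_to_natCast]
    simp [List.getElem?_eq_getElem hk, List.getElem?_cons_succ]

lemma gflo_loop_eq (efield : String) (efields : List (String × Int × Int)) :
    ∀ off : Int, gfloLoopA efield efields off =
      ((get_field_len_offset_alt efield efields).1,
       off + (get_field_len_offset_alt efield efields).2) := by
  induction efields with
  | nil => intro off; simp [gfloLoopA, alt_unfold]
  | cons f rest ih =>
    intro off
    by_cases h : f.1 = efield
    · subst h
      rw [alt_cons_self]
      simp [gfloLoopA]
    · rw [alt_cons_ne efield f rest h, gfloLoopA, if_neg (by simp [h]), ih]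
      simp only [Prod.mk.injEq]
      exact ⟨trivial, by ring⟩

theorem get_field_len_offset_spec : Claim_equal_get_field_len_offset := by
  intro efield efields _
  unfold Spec_get_field_len_offset get_field_len_offset
  rw [gflo_loop_eq]
  simp
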